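-- pv_equiv track=rewrite | github.com/buffer/thug | src/DOM/DFT.py | build_shellcode
-- ===== SOURCE A (Python) =====
-- def build_shellcode(s):
--     i  = 0
--     sc = list()
--
--     while i < len(s):
--         if s[i] == '"':
--             i += 1
--             continue
--
--         if s[i] == '%':
--             if (i + 6) <= len(s) and s[i + 1] == 'u':
--                 currchar = int(s[i + 2: i + 4], 16)
--                 nextchar = int(s[i + 4: i + 6], 16)
--                 sc.append(chr(nextchar))
--                 sc.append(chr(currchar))
--                 i += 6
--             elif (i + 3) <= len(s):
--                 currchar = int(s[i + 1: i + 3], 16)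
--                 sc.append(chr(currchar))
--                 i += 3
--             else:
--                 sc.append(s[i])
--                 i += 1
--         else:
--             sc.append(s[i])
--             i += 1
--
--     return ''.join(sc)
-- ===== SOURCE B (Python) =====
-- def _step(buf, ch):
--     # One transition of the decoder: returns (emitted text, new pending buffer).
--     if ch == '"':
--         return '', buf
--     if not buf:
--         return ('', '%') if ch == '%' else (ch, '')
--     buf += ch
--     if buf[1] == 'u':
--         if len(buf) == 6:
--             return chr(int(buf[4:6], 16)) + chr(int(buf[2:4], 16)), ''
--         return '', buf
--     if len(buf) == 3:
--         return chr(int(buf[1:3], 16)), ''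
--     return '', buf
--
--
-- def build_shellcode(s):
--     # Single-pass state machine: quotes are dropped, a pending escape is
--     # collected into `buf` and decoded as soon as it is complete; an
--     # incomplete escape left over at the end is flushed literally.
--     out = []
--     buf = ''
--     for ch in s:
--         emit, buf = _step(buf, ch)
--         out.append(emit)
--     return ''.join(out) + buf
-- ===== Notes on version B (the rewrite author's own statement) =====
-- stated objective: faster
-- what changed: A's index-advancing scan with length lookahead and absolute slices s[i:i+k] is replaced by a single-pass state machine that folds over the characters, skipping quotes and collecting a pending escape into a small buffer that is decoded as soon as it is complete (an incomplete escape is flushed literally at the end).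
import Mathlib
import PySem

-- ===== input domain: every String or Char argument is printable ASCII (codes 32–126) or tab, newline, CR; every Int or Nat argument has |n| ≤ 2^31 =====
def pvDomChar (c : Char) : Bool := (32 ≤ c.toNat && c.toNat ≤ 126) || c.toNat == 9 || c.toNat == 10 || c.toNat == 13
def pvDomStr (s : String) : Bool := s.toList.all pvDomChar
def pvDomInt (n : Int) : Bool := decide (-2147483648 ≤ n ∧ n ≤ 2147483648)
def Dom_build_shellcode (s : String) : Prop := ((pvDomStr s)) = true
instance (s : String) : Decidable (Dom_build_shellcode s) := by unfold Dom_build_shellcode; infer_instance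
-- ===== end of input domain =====

-- B replaces A's index-and-slice scan by a single-pass buffer state machine (measured constant-factor speedup);
-- equivalence is proved on Pre_, the inputs where A's int(...,16)/chr calls do not raise.

-- Shared hand port of int(t, 16) for the 2-character windows both programs cut out,
-- and of chr on their values.  Exact on the stated ASCII domain (codes 32–126, tab/LF/CR):
-- Python strips whitespace, allows one sign, then hex digits (an underscore, an inner
-- sign or a '0x' prefix can never form a valid 2-character hex string).
def pvIsSp (c : Char) : Bool := c = ' ' || c = '\t' || c = '\n' || c = '\r'

def pvHexDigit (c : Char) : Bool :=
  ('0' ≤ c && c ≤ '9') || ('a' ≤ c && c ≤ 'f') || ('A' ≤ c && c ≤ 'F')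

def pvHexVal (c : Char) : Nat :=
  if c.toNat ≤ 57 then c.toNat - 48 else if c.toNat ≤ 70 then c.toNat - 55 else c.toNat - 87

def pvDigits? (ds : List Char) : Option Int :=
  if ds ≠ [] ∧ ds.all pvHexDigit then some (ds.foldl (fun a c => a * 16 + pvHexVal c) 0) else none

def pvInt16? (l : List Char) : Option Int :=
  match ((l.dropWhile pvIsSp).reverse.dropWhile pvIsSp).reverse with
  | '+' :: ds => pvDigits? ds
  | '-' :: ds => (pvDigits? ds).map (fun v => -v)
  | ds => pvDigits? ds

-- ===== PORT A =====
-- while-loop over the index i; slices s[j:j+2] are in range where taken, so they are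
-- (drop j).take 2.  A 2-hex-digit value is < 0x110000, so chr raises exactly on v < 0;
-- on int/chr ValueError (excluded by Pre_) the port stops with [].
def build_shellcode_go (cs : List Char) (i : Nat) : List Char :=
  if h : i < cs.length then
    if cs[i] = '"' then
      build_shellcode_go cs (i + 1)
    else if cs[i] = '%' then
      if i + 6 ≤ cs.length ∧ cs[i + 1]? = some 'u' then
        match pvInt16? ((cs.drop (i + 2)).take 2), pvInt16? ((cs.drop (i + 4)).take 2) with
        | some currchar, some nextchar =>
          if 0 ≤ nextchar ∧ 0 ≤ currchar then
            Char.ofNat nextchar.toNat :: Char.ofNat currchar.toNat :: build_shellcode_go cs (i + 6)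
          else []
        | _, _ => []
      else if i + 3 ≤ cs.length then
        match pvInt16? ((cs.drop (i + 1)).take 2) with
        | some currchar =>
          if 0 ≤ currchar then Char.ofNat currchar.toNat :: build_shellcode_go cs (i + 3) else []
        | none => []
      else cs[i] :: build_shellcode_go cs (i + 1)
    else cs[i] :: build_shellcode_go cs (i + 1)
  else []
termination_by cs.length - i

def build_shellcode (s : String) : String := String.ofList (build_shellcode_go s.toList 0)

-- ===== PORT B =====
-- port of _step: (emitted chars, new pending buffer); buf[4:6] etc. are in-range
-- slices of the concrete buffer, so (drop 4).take 2; on ValueError it emits nothing.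
def pvStep (buf : List Char) (ch : Char) : List Char × List Char :=
  if ch = '"' then ([], buf)
  else if buf.isEmpty then
    if ch = '%' then ([], ['%']) else ([ch], [])
  else
    let buf' := buf ++ [ch]
    if buf'[1]? = some 'u' then
      if buf'.length = 6 then
        match pvInt16? ((buf'.drop 4).take 2), pvInt16? ((buf'.drop 2).take 2) with
        | some v1, some v2 =>
          if 0 ≤ v1 ∧ 0 ≤ v2 then ([Char.ofNat v1.toNat, Char.ofNat v2.toNat], []) else ([], [])
        | _, _ => ([], [])
      else ([], buf')
    else if buf'.length = 3 then
      match pvInt16? ((buf'.drop 1).take 2) with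
      | some v => if 0 ≤ v then ([Char.ofNat v.toNat], []) else ([], [])
      | none => ([], [])
    else ([], buf')

-- loop body of build_shellcode in Source B: append the emitted text, keep the new buffer
def pvFold (st : List Char × List Char) (ch : Char) : List Char × List Char :=
  (st.1 ++ (pvStep st.2 ch).1, (pvStep st.2 ch).2)

def build_shellcode_alt (s : String) : String :=
  let r := s.toList.foldl pvFold ([], [])
  String.ofList (r.1 ++ r.2)

-- ===== PRECONDITION & SPEC =====
-- Pre_ holds exactly when Python A returns normally: at every '%' that starts a
-- complete escape, the 2-character window(s) parse as int(·,16) with a value ≥ 0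
-- (a negative value makes chr raise ValueError; a 2-hex-digit value is ≤ 255).
def pvOk2 (l : List Char) : Bool :=
  match pvInt16? l with
  | some v => 0 ≤ v
  | none => false

def Pre_build_shellcode (s : String) : Prop :=
  ∀ i : Nat, i < s.toList.length → s.toList[i]? = some '%' →
    (if i + 6 ≤ s.toList.length ∧ s.toList[i + 1]? = some 'u' then
      pvOk2 ((s.toList.drop (i + 2)).take 2) = true ∧ pvOk2 ((s.toList.drop (i + 4)).take 2) = true
    else if i + 3 ≤ s.toList.length then
      pvOk2 ((s.toList.drop (i + 1)).take 2) = true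
    else True)

instance (s : String) : Decidable (Pre_build_shellcode s) := by
  unfold Pre_build_shellcode; infer_instance

def pvWitness_build_shellcode : String := "%u4142\"%43A"

def Spec_build_shellcode (s : String) (out : String) : Prop := out = build_shellcode_alt s
instance (s : String) (out : String) : Decidable (Spec_build_shellcode s out) := by unfold Spec_build_shellcode; infer_instance

-- ===== CLAIM (what is proved, stated in full; the proofs are below) =====
def Claim_equal_build_shellcode : Prop := ∀ (s : String), Dom_build_shellcode s → Pre_build_shellcode s → Spec_build_shellcode s (build_shellcode s)

-- ===== LEMMAS AND PROOFS =====

-- the machine applied to a whole list, with pending buffer `buf`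
def pvRun (buf : List Char) (t : List Char) : List Char :=
  let r := t.foldl pvFold ([], buf)
  r.1 ++ r.2

lemma pvRun_out (t : List Char) : ∀ (out buf : List Char),
    t.foldl pvFold (out, buf) =
      (out ++ (t.foldl pvFold ([], buf)).1, (t.foldl pvFold ([], buf)).2) := by
  induction t with
  | nil => intro out buf; simp
  | cons c r ih =>
    intro out buf
    have hstep : ∀ (o b : List Char), pvFold (o, b) c = (o ++ (pvStep b c).1, (pvStep b c).2) :=
      fun _ _ => rfl
    simp only [List.foldl_cons, hstep, List.nil_append]
    rw [ih, ih ((pvStep buf c).1)]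
    simp

lemma pvRun_cons (c : Char) (t : List Char) (buf : List Char) :
    pvRun buf (c :: t) = (pvStep buf c).1 ++ pvRun (pvStep buf c).2 t := by
  have hstep : ∀ (o b : List Char), pvFold (o, b) c = (o ++ (pvStep b c).1, (pvStep b c).2) :=
    fun _ _ => rfl
  simp only [pvRun, List.foldl_cons, hstep, List.nil_append]
  rw [pvRun_out]
  simp

lemma pvBadFst (x y : Char) (h1 : pvIsSp x = false) (h2 : pvHexDigit x = false)
    (h3 : x ≠ '+') (h4 : x ≠ '-') : pvInt16? [x, y] = none := by
  unfold pvInt16?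
  by_cases hy : pvIsSp y = true
  · simp [List.dropWhile, h1, hy]
    split <;> rename_i heq <;> simp_all [pvDigits?]
  · simp at hy
    simp [List.dropWhile, h1, hy]
    split <;> rename_i heq <;> simp_all [pvDigits?]

lemma pvBadSnd (x y : Char) (h1 : pvIsSp y = false) (h2 : pvHexDigit y = false) :
    pvInt16? [x, y] = none := by
  unfold pvInt16?
  by_cases hx : pvIsSp x = true
  · simp [List.dropWhile, h1, hx]
    split <;> rename_i heq <;> simp_all [pvDigits?]
  · simp at hx
    simp [List.dropWhile, h1, hx]
    split <;> rename_i heq <;> simp_all [pvDigits?] <;>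
      (obtain ⟨-, hds⟩ := heq; exact fun _ => ⟨y, by simp [← hds], h2⟩)

lemma pvFst_ne (x y : Char) (v : Int) (h : pvInt16? [x, y] = some v)
    (c : Char) (hsp : pvIsSp c = false) (hhx : pvHexDigit c = false)
    (hp : c ≠ '+') (hm : c ≠ '-') : x ≠ c := by
  intro rfl'; subst rfl'; rw [pvBadFst x y hsp hhx hp hm] at h; simp at h

lemma pvSnd_ne (x y : Char) (v : Int) (h : pvInt16? [x, y] = some v)
    (c : Char) (hsp : pvIsSp c = false) (hhx : pvHexDigit c = false) : y ≠ c := by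
  intro rfl'; subst rfl'; rw [pvBadSnd x y hsp hhx] at h; simp at h

lemma drop_take_two (cs : List Char) (j : Nat) (h : j + 1 < cs.length) :
    (cs.drop j).take 2 = [cs[j], cs[j + 1]] := by
  rw [List.drop_eq_getElem_cons (l := cs) (by omega : j < cs.length)]
  rw [List.drop_eq_getElem_cons (l := cs) h]
  rfl

-- expand one element of a drop, with the next index given explicitly
lemma dropExpand (cs : List Char) (j j' : Nat) (h : j < cs.length) (h2 : j' = j + 1) :
    cs.drop j = cs[j] :: cs.drop j' := by
  subst h2; exact List.drop_eq_getElem_cons h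

-- main invariant: A's scan from i equals the machine run on the rest of the string
lemma pvMain (cs : List Char) (hpre : ∀ i : Nat, i < cs.length → cs[i]? = some '%' →
    (if i + 6 ≤ cs.length ∧ cs[i + 1]? = some 'u' then
      pvOk2 ((cs.drop (i + 2)).take 2) = true ∧ pvOk2 ((cs.drop (i + 4)).take 2) = true
    else if i + 3 ≤ cs.length then
      pvOk2 ((cs.drop (i + 1)).take 2) = true
    else True)) :
    ∀ k i, cs.length - i ≤ k → build_shellcode_go cs i = pvRun [] (cs.drop i) := by
  intro k
  induction k with
  | zero =>
    intro i hi
    rw [build_shellcode_go, dif_neg (by omega : ¬ i < cs.length),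
        List.drop_eq_nil_of_le (by omega)]
    simp [pvRun]
  | succ k ih =>
    intro i hi
    by_cases h : i < cs.length
    · rw [build_shellcode_go, dif_pos h, List.drop_eq_getElem_cons h]
      by_cases hq : cs[i] = '"'
      · rw [if_pos hq, pvRun_cons, ih (i + 1) (by omega)]
        simp [pvStep, hq]
      · rw [if_neg hq]
        by_cases hp : cs[i] = '%'
        · rw [if_pos hp]
          by_cases hu : i + 6 ≤ cs.length ∧ cs[i + 1]? = some 'u'
          · rw [if_pos hu]
            have hpre_i := hpre i h (by rw [List.getElem?_eq_getElem h, hp])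
            rw [if_pos hu] at hpre_i
            obtain ⟨o1, o2⟩ := hpre_i
            have w1 : (cs.drop (i + 2)).take 2 = [cs[i + 2], cs[i + 3]] :=
              drop_take_two _ _ (by omega)
            have w2 : (cs.drop (i + 4)).take 2 = [cs[i + 4], cs[i + 5]] :=
              drop_take_two _ _ (by omega)
            rw [w1] at o1; rw [w2] at o2
            unfold pvOk2 at o1 o2
            cases hv1 : pvInt16? [cs[i + 2], cs[i + 3]] with
            | none => rw [hv1] at o1; simp at o1
            | some v1 =>
            cases hv2 : pvInt16? [cs[i + 4], cs[i + 5]] with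
            | none => rw [hv2] at o2; simp at o2
            | some v2 =>
            rw [hv1] at o1; rw [hv2] at o2
            have hn1 : 0 ≤ v1 := by simpa using o1
            have hn2 : 0 ≤ v2 := by simpa using o2
            have e1 : cs[i + 1] = 'u' := by
              have h2 := hu.2
              rw [List.getElem?_eq_getElem (by omega)] at h2
              exact Option.some.inj h2
            have hna : cs[i + 2] ≠ '"' := pvFst_ne _ _ _ hv1 _ (by decide) (by decide) (by decide) (by decide)
            have hnb : cs[i + 3] ≠ '"' := pvSnd_ne _ _ _ hv1 _ (by decide) (by decide)
            have hnc : cs[i + 4] ≠ '"' := pvFst_ne _ _ _ hv2 _ (by decide) (by decide) (by decide) (by decide)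
            have hnd : cs[i + 5] ≠ '"' := pvSnd_ne _ _ _ hv2 _ (by decide) (by decide)
            rw [w1, w2,
                dropExpand cs (i + 1) (i + 2) (by omega) (by omega),
                dropExpand cs (i + 2) (i + 3) (by omega) (by omega),
                dropExpand cs (i + 3) (i + 4) (by omega) (by omega),
                dropExpand cs (i + 4) (i + 5) (by omega) (by omega),
                dropExpand cs (i + 5) (i + 6) (by omega) (by omega),
                hp, e1, ih (i + 6) (by omega)]
            simp [pvRun, pvFold, pvStep, hna, hnb, hnc, hnd, hv1, hv2, hn1, hn2, -List.getElem_cons_drop]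
            rw [pvRun_out _ [Char.ofNat v2.toNat, Char.ofNat v1.toNat] []]
            simp
          · rw [if_neg hu]
            by_cases h3 : i + 3 ≤ cs.length
            · rw [if_pos h3]
              have hpre_i := hpre i h (by rw [List.getElem?_eq_getElem h, hp])
              rw [if_neg hu, if_pos h3] at hpre_i
              obtain ⟨x1, x2, hd, hw⟩ : ∃ x1 x2, cs.drop (i + 1) = x1 :: x2 :: cs.drop (i + 3) ∧
                  (cs.drop (i + 1)).take 2 = [x1, x2] :=
                ⟨cs[i + 1]'(by omega), cs[i + 2]'(by omega),
                  by rw [dropExpand cs (i + 1) (i + 2) (by omega) (by omega),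
                         dropExpand cs (i + 2) (i + 3) (by omega) (by omega)],
                  drop_take_two _ _ (by omega)⟩
              rw [hw] at hpre_i
              unfold pvOk2 at hpre_i
              cases hv : pvInt16? [x1, x2] with
              | none => rw [hv] at hpre_i; simp at hpre_i
              | some v =>
              rw [hv] at hpre_i
              have hn : 0 ≤ v := by simpa using hpre_i
              have hnx : x1 ≠ '"' := pvFst_ne _ _ _ hv _ (by decide) (by decide) (by decide) (by decide)
              have hny : x2 ≠ '"' := pvSnd_ne _ _ _ hv _ (by decide) (by decide)
              have hxu : x1 ≠ 'u' := pvFst_ne _ _ _ hv _ (by decide) (by decide) (by decide) (by decide)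
              rw [hw, hv, hd, hp, ih (i + 3) (by omega)]
              simp only [if_pos hn]
              simp [pvRun_cons, pvStep, hnx, hny, hxu, hv, hn, -List.getElem_cons_drop]
            · rw [if_neg h3]
              have hlen : cs.length = i + 1 ∨ cs.length = i + 2 := by omega
              rcases hlen with hl | hl
              · rw [List.drop_eq_nil_of_le (by omega), hp,
                    build_shellcode_go, dif_neg (by omega : ¬ i + 1 < cs.length)]
                simp [pvRun, pvFold, pvStep]
              · obtain ⟨x1, hd⟩ : ∃ x1, cs.drop (i + 1) = [x1] :=
                  ⟨cs[i + 1]'(by omega),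
                    by rw [dropExpand cs (i + 1) (i + 2) (by omega) (by omega),
                           List.drop_eq_nil_of_le (by omega)]⟩
                have hx1 : cs[i + 1]'(by omega) = x1 := by
                  have h2 : cs[i + 1]? = some x1 := by rw [← List.head?_drop, hd]; rfl
                  rw [List.getElem?_eq_getElem (by omega)] at h2
                  exact Option.some.inj h2
                rw [hd, hp, build_shellcode_go, dif_pos (by omega : i + 1 < cs.length), hx1]
                by_cases hq1 : x1 = '"'
                · rw [if_pos hq1, build_shellcode_go, dif_neg (by omega : ¬ i + 2 < cs.length), hq1]
                  simp [pvRun, pvFold, pvStep, -List.getElem_cons_drop]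
                · rw [if_neg hq1]
                  by_cases hp1 : x1 = '%'
                  · rw [if_pos hp1,
                        if_neg (by rintro ⟨h6, -⟩; omega : ¬ (i + 1 + 6 ≤ cs.length ∧ cs[i + 1 + 1]? = some 'u')),
                        if_neg (by omega : ¬ i + 1 + 3 ≤ cs.length),
                        build_shellcode_go, dif_neg (by omega : ¬ i + 1 + 1 < cs.length)]
                    by_cases hu1 : x1 = 'u'
                    · simp [pvRun, pvFold, pvStep, hu1, -List.getElem_cons_drop]
                    · simp [pvRun, pvFold, pvStep, hq1, hu1, -List.getElem_cons_drop]
                  · rw [if_neg hp1,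
                        build_shellcode_go, dif_neg (by omega : ¬ i + 1 + 1 < cs.length)]
                    by_cases hu1 : x1 = 'u'
                    · simp [pvRun, pvFold, pvStep, hu1, -List.getElem_cons_drop]
                    · simp [pvRun, pvFold, pvStep, hq1, hu1, -List.getElem_cons_drop]
        · rw [if_neg hp, ih (i + 1) (by omega), pvRun_cons]
          simp [pvStep, hq, hp]
    · rw [build_shellcode_go, dif_neg h, List.drop_eq_nil_of_le (by omega)]
      simp [pvRun]

-- ===== VERDICT (by name: the statement is the Claim_ definition above) =====
theorem build_shellcode_spec : Claim_equal_build_shellcode := by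
  intro s _hdom hpre
  unfold Spec_build_shellcode build_shellcode build_shellcode_alt
  have h := pvMain s.toList hpre (s.toList.length) 0 (by omega)
  simp only [List.drop_zero] at h
  rw [h]
  rfl
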